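-- pv_equiv track=rewrite | github.com/estebanhernandezr/Information-theory-Clustering | python/classes/Phylo/Phylogenetic_tree_constructor.py | lower_triangular
-- ===== SOURCE A (Python) =====
-- def lower_triangular(matrix):
--     new_filas = []
--     for fila in matrix:
--         new_fila = []
--         for c in fila:
--             new_fila.append(c)
--             if c == 0:
--                 break
--         new_filas.append(new_fila)
--     return new_filas
-- ===== SOURCE B (Python) =====
-- def lower_triangular(matrix):
--     out = []
--     for fila in matrix:
--         try:
--             idx = fila.index(0)
--             out.append(fila[:idx + 1])
--         except ValueError:
--             out.append(list(fila))
--     return out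
-- ===== Notes on version B (the rewrite author's own statement) =====
-- stated objective: simpler
-- what changed: Per row, B computes the cut point once with fila.index(0) and emits a bulk slice fila[:idx+1] (full copy when no zero), replacing A's element-by-element append-and-break inner loop.
import Mathlib
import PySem

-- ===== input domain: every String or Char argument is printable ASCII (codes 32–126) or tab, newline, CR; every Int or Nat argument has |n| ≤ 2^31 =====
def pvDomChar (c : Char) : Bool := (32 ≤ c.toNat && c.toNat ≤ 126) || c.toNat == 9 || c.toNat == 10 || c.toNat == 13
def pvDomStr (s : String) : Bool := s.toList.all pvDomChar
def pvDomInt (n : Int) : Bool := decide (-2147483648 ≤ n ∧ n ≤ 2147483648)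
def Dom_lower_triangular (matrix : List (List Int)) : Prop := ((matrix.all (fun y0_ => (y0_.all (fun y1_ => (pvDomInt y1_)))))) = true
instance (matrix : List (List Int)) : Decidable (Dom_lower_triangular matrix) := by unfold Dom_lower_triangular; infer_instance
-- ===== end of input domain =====

-- B replaces A's per-element append-and-break inner loop by a single index-of-zero computation plus a bulk slice (objective: simpler).

-- ===== PORT A =====
-- inner 'for c in fila: append; if c == 0: break' with accumulator new_fila
def lower_triangular_row (fila : List Int) (new_fila : List Int) : List Int :=
  match fila with
  | [] => new_fila
  | c :: rest =>
      if c == 0 then new_fila ++ [c] else lower_triangular_row rest (new_fila ++ [c])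

def lower_triangular (matrix : List (List Int)) : List (List Int) :=
  matrix.foldl (fun new_filas fila => new_filas ++ [lower_triangular_row fila []]) []

-- ===== PORT B =====
-- fila.index(0) then fila[:idx+1]; on ValueError a full copy of fila
def lower_triangular_alt_row (fila : List Int) : List Int :=
  match PySem.List.index? fila 0 with
  | some idx => PySem.List.slice fila none (some ((idx : Int) + 1))
  | none => fila

def lower_triangular_alt (matrix : List (List Int)) : List (List Int) :=
  matrix.map lower_triangular_alt_row

-- ===== PRECONDITION & SPEC =====
def Spec_lower_triangular (matrix : List (List Int)) (out : List (List Int)) : Prop := out = lower_triangular_alt matrix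
instance (matrix : List (List Int)) (out : List (List Int)) : Decidable (Spec_lower_triangular matrix out) := by unfold Spec_lower_triangular; infer_instance

-- ===== CLAIM (what is proved, stated in full; the proofs are below) =====
def Claim_equal_lower_triangular : Prop := ∀ (matrix : List (List Int)), Dom_lower_triangular matrix → Spec_lower_triangular matrix (lower_triangular matrix)

-- ===== LEMMAS AND PROOFS =====

theorem row_eq (fila : List Int) (acc : List Int) :
    lower_triangular_row fila acc = acc ++ lower_triangular_alt_row fila := by
  induction fila generalizing acc with
  | nil => simp [lower_triangular_row, lower_triangular_alt_row, PySem.List.index?]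
  | cons c rest ih =>
      by_cases hc : c = 0
      · subst hc
        unfold lower_triangular_alt_row
        rw [PySem.List.index?_cons_self]
        dsimp only
        rw [show ((0 : Nat) : Int) + 1 = ((1 : Nat) : Int) from by norm_num,
            PySem.List.slice_to_natCast]
        simp [lower_triangular_row]
      · have h1 : lower_triangular_row (c :: rest) acc = lower_triangular_row rest (acc ++ [c]) := by
          simp [lower_triangular_row, hc]
        rw [h1, ih]
        unfold lower_triangular_alt_row
        rw [PySem.List.index?_cons_of_ne (xs := rest) hc]
        cases h : PySem.List.index? rest 0 with
        | none =>
            dsimp only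
            simp
        | some k =>
            simp only [Option.map_some]
            rw [show ((k : Nat) : Int) + 1 = (((k + 1 : Nat)) : Int) from by push_cast; ring]
            rw [show (((k + 1 : Nat)) : Int) + 1 = (((k + 2 : Nat)) : Int) from by push_cast; ring]
            rw [PySem.List.slice_to_natCast, PySem.List.slice_to_natCast]
            simp [List.take_succ_cons]

theorem fold_eq (xs : List (List Int)) (acc : List (List Int)) :
    xs.foldl (fun new_filas fila => new_filas ++ [lower_triangular_row fila []]) acc
      = acc ++ xs.map lower_triangular_alt_row := by
  induction xs generalizing acc with
  | nil => simp
  | cons y ys ih =>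
      rw [List.foldl_cons, ih, row_eq]
      simp

theorem lower_triangular_eq (matrix : List (List Int)) :
    lower_triangular matrix = lower_triangular_alt matrix := by
  unfold lower_triangular lower_triangular_alt
  simpa using fold_eq matrix []

-- ===== VERDICT (by name: the statement is the Claim_ definition above) =====
theorem lower_triangular_spec : Claim_equal_lower_triangular := by
  intro matrix _
  unfold Spec_lower_triangular
  exact lower_triangular_eq matrix
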